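-- pv_equiv track=rewrite | github.com/HaoCuii/DMOJ-Solutions | CCC '11 J5 - Unfriend.py | count_good_subsets
-- ===== SOURCE A (Python) =====
-- def count_good_subsets(sample, m):
--     goods = 0
--     n = len(sample)
--
--     # Generate all contiguous subsets
--     for start in range(n):
--         seen = set()  # To track unique elements
--         for end in range(start, n):
--             # If a duplicate is found, break early
--             if sample[end] in seen:
--                 break
--             seen.add(sample[end])
--
--             # If any element is greater than m, break early
--             if sample[end] > m:
--                 break
--
--             # If the subset is valid, count it
--             goods += 1
--
--     return goods
-- ===== SOURCE B (Python) =====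
-- def count_good_subsets(sample, m):
--     # Back-to-front O(n) pass: f = length of longest valid window starting here,
--     # via f(s) = min(f(s+1) + 1, distance to next occurrence of sample[s]), 0 if > m.
--     lastk = {}
--     f = 0
--     goods = 0
--     for k, x in enumerate(reversed(sample)):
--         if x > m:
--             f = 0
--         else:
--             f = min(f + 1, k - lastk.get(x, -1))
--         lastk[x] = k
--         goods += f
--     return goods
-- ===== Notes on version B (the rewrite author's own statement) =====
-- stated objective: faster
-- what changed: Replaced the quadratic all-start-points scan with a single right-to-left O(n) pass that maintains the longest valid window length via the recurrence f(s) = min(f(s+1)+1, distance to next occurrence of sample[s]) using a last-seen dictionary.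
import Mathlib
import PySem

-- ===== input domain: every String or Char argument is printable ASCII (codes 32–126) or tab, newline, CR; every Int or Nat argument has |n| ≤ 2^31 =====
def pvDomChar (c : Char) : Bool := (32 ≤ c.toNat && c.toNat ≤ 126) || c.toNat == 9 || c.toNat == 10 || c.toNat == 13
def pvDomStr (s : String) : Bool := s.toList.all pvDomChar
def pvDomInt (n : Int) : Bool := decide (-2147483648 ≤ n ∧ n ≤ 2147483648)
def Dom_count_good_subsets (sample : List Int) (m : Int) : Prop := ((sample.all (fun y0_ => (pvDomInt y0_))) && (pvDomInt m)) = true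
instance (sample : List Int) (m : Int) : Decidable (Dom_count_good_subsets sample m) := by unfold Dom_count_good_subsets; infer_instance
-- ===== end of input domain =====

-- B replaces A's quadratic scan over all start points by one right-to-left O(n) pass
-- with a last-seen dictionary (objective: faster, asymptotic O(n^2) -> O(n)).

-- ===== PORT A =====
-- inner loop 'for end in range(start, n)' with the two breaks; indices produced by
-- range(start, n) are always in range, so sample[end] is pyGetD with a dummy default (exact here)
def innerA (sample : List Int) (m : Int) : List Int → PySem.Set Int → Int → Int
  | [], _, goods => goods
  | e :: rest, seen, goods =>
      let x := PySem.List.pyGetD sample e 0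
      if PySem.Set.contains seen x then goods
      else
        let seen' := PySem.Set.add seen x
        if x > m then goods
        else innerA sample m rest seen' (goods + 1)

def count_good_subsets (sample : List Int) (m : Int) : Int :=
  let n : Int := sample.length
  (PySem.List.pyRange 0 n 1).foldl
    (fun goods s => innerA sample m (PySem.List.pyRange s n 1) PySem.Set.empty goods) 0

-- ===== PORT B =====
def count_good_subsets_alt (sample : List Int) (m : Int) : Int :=
  let st := (PySem.List.enumerate sample.reverse 0).foldl
    (fun (st : PySem.Dict Int Int × Int × Int) kx =>
      let lastk := st.1
      let f := st.2.1
      let goods := st.2.2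
      let k := kx.1
      let x := kx.2
      let f' := if x > m then 0 else min (f + 1) (k - lastk.getD x (-1))
      (lastk.insert x k, f', goods + f'))
    (PySem.Dict.empty, 0, 0)
  st.2.2

-- ===== PRECONDITION & SPEC =====
def Spec_count_good_subsets (sample : List Int) (m : Int) (out : Int) : Prop := out = count_good_subsets_alt sample m
instance (sample : List Int) (m : Int) (out : Int) : Decidable (Spec_count_good_subsets sample m out) := by unfold Spec_count_good_subsets; infer_instance

-- ===== CLAIM (what is proved, stated in full; the proofs are below) =====
def Claim_equal_count_good_subsets : Prop := ∀ (sample : List Int) (m : Int), Dom_count_good_subsets sample m → Spec_count_good_subsets sample m (count_good_subsets sample m)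

-- ===== LEMMAS AND PROOFS =====

-- length of the longest duplicate-free, all-≤-m prefix of l
def Fspec (m : Int) : List Int → Nat
  | [] => 0
  | x :: xs => if m < x then 0 else 1 + min (Fspec m xs) (xs.findIdx (· == x))

-- sum of Fspec over all suffixes
def Gspec (m : Int) : List Int → Nat
  | [] => 0
  | x :: xs => Fspec m (x :: xs) + Gspec m xs

-- generalisation of Fspec with a "seen" set, matching A's inner loop
def Fseen (m : Int) (seen : List Int) : List Int → Nat
  | [] => 0
  | x :: xs => if x ∈ seen ∨ m < x then 0 else 1 + Fseen m (x :: seen) xs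

lemma Fspec_le_length (m : Int) (l : List Int) : Fspec m l ≤ l.length := by
  induction l with
  | nil => simp [Fspec]
  | cons x xs ih =>
      simp only [Fspec, List.length_cons]
      split_ifs <;> omega

lemma findIdx_or (p q : Int → Bool) (l : List Int) :
    l.findIdx (fun v => p v || q v) = min (l.findIdx p) (l.findIdx q) := by
  induction l with
  | nil => simp [List.findIdx_nil]
  | cons x xs ih =>
      by_cases hp : p x <;> by_cases hq : q x <;>
        simp only [List.findIdx_cons, hp, hq, Bool.true_or, Bool.or_true,
          Bool.false_or, Bool.or_false, cond_true, cond_false, ih] <;> omega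

lemma Fseen_congr (m : Int) (s₁ s₂ : List Int) (l : List Int)
    (h : ∀ v, v ∈ s₁ ↔ v ∈ s₂) : Fseen m s₁ l = Fseen m s₂ l := by
  induction l generalizing s₁ s₂ with
  | nil => rfl
  | cons x xs ih =>
      simp only [Fseen, h x]
      split_ifs
      · rfl
      · exact congrArg (1 + ·) (ih _ _ (by intro v; simp [h v]))

lemma Fseen_eq (m : Int) (l : List Int) : ∀ (seen : List Int),
    Fseen m seen l = min (Fspec m l) (l.findIdx (fun v => decide (v ∈ seen))) := by
  induction l with
  | nil => intro seen; simp [Fseen, Fspec]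
  | cons x xs ih =>
      intro seen
      by_cases hx : x ∈ seen
      · simp [Fseen, Fspec, hx, List.findIdx_cons]
      · by_cases hm : m < x
        · simp [Fseen, Fspec, hx, hm]
        · have h1 : Fseen m seen (x :: xs) = 1 + Fseen m (x :: seen) xs := by
            simp [Fseen, hx, hm]
          have h2 : (fun v => decide (v ∈ x :: seen)) =
              (fun v => (v == x) || decide (v ∈ seen)) := by
            funext v; simp [List.mem_cons]; by_cases h : v = x <;> simp [h]
          rw [h1, ih (x :: seen), h2, findIdx_or]
          have h3 : (x :: xs).findIdx (fun v => decide (v ∈ seen)) =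
              xs.findIdx (fun v => decide (v ∈ seen)) + 1 := by
            simp [List.findIdx_cons, hx]
          simp only [Fspec, if_neg hm, h3]
          omega

lemma innerA_eq (sample : List Int) (m : Int) : ∀ (e : Nat), e ≤ sample.length →
    ∀ (seen : PySem.Set Int) (goods : Int),
    innerA sample m (PySem.List.pyRange (e : Int) (sample.length : Int) 1) seen goods
      = goods + (Fseen m seen (sample.drop e) : Int) := by
  intro e
  induction hn : sample.length - e generalizing e with
  | zero =>
      intro he seen goods
      have he' : e = sample.length := by omega
      subst he'
      rw [PySem.List.pyRange_one_eq_nil (by omega)]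
      simp [innerA, Fseen, List.drop_length]
  | succ n ih =>
      intro he seen goods
      have hlt : e < sample.length := by omega
      rw [PySem.List.pyRange_one_cons (by exact_mod_cast hlt)]
      have hget : PySem.List.pyGetD sample (e : Int) 0 = sample[e] := by
        simp [PySem.List.pyGetD_natCast, hlt]
      have hdrop : sample.drop e = sample[e] :: sample.drop (e + 1) :=
        (List.getElem_cons_drop hlt).symm
      simp only [innerA, hget]
      by_cases hseen : sample[e] ∈ seen
      · have hc : PySem.Set.contains seen sample[e] = true := by
          simp [PySem.Set.contains_eq_listContains]; exact hseen
        rw [if_pos hc, hdrop]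
        have : Fseen m seen (sample[e] :: sample.drop (e+1)) = 0 := by
          simp only [Fseen, if_pos (Or.inl hseen)]
        rw [this]
        simp
      · have hc : PySem.Set.contains seen sample[e] = false := by
          simp [PySem.Set.contains_eq_listContains]; exact hseen
        rw [if_neg (by rw [hc]; exact Bool.false_ne_true)]
        by_cases hm : sample[e] > m
        · rw [if_pos hm, hdrop]
          have : Fseen m seen (sample[e] :: sample.drop (e+1)) = 0 := by
            simp only [Fseen, if_pos (Or.inr hm)]
          rw [this]
          simp
        · rw [if_neg hm]
          have h1 : ((e : Int) + 1) = ((e + 1 : Nat) : Int) := by push_cast; ring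
          rw [h1, ih (e + 1) (by omega) (by omega)]
          rw [hdrop]
          have hcong : Fseen m (PySem.Set.add seen sample[e]) (sample.drop (e + 1))
              = Fseen m (sample[e] :: seen) (sample.drop (e + 1)) := by
            apply Fseen_congr
            intro v
            simp [PySem.Set.mem_add, List.mem_cons]
            tauto
          simp only [Fseen, hseen, false_or]
          rw [if_neg (by push_neg at hm; omega), hcong]
          push_cast
          ring

lemma Fseen_nil_eq (m : Int) (l : List Int) : Fseen m PySem.Set.empty l = Fspec m l := by
  show Fseen m [] l = Fspec m l
  rw [Fseen_eq]
  have h : l.findIdx (fun v => decide (v ∈ ([] : List Int))) = l.length := by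
    simp [List.findIdx_eq_length]
  rw [h]
  exact Nat.min_eq_left (Fspec_le_length m l)

lemma outerA_eq (sample : List Int) (m : Int) : ∀ (t : Nat), t ≤ sample.length →
    ∀ (g : Int),
    (PySem.List.pyRange (t : Int) (sample.length : Int) 1).foldl
      (fun goods s => innerA sample m (PySem.List.pyRange s (sample.length : Int) 1) PySem.Set.empty goods) g
      = g + (Gspec m (sample.drop t) : Int) := by
  intro t
  induction hn : sample.length - t generalizing t with
  | zero =>
      intro ht g
      have : t = sample.length := by omega
      subst this
      rw [PySem.List.pyRange_one_eq_nil (by omega)]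
      simp [Gspec, List.drop_length]
  | succ n ih =>
      intro ht g
      have hlt : t < sample.length := by omega
      rw [PySem.List.pyRange_one_cons (by exact_mod_cast hlt)]
      simp only [List.foldl_cons]
      rw [innerA_eq sample m t (by omega)]
      have h1 : ((t : Int) + 1) = ((t + 1 : Nat) : Int) := by push_cast; ring
      rw [h1, ih (t + 1) (by omega) (by omega)]
      have hdrop : sample.drop t = sample[t] :: sample.drop (t + 1) :=
        (List.getElem_cons_drop hlt).symm
      rw [Fseen_nil_eq]
      rw [hdrop]
      show g + (Fspec m (sample[t] :: sample.drop (t+1)) : Int) + (Gspec m (sample.drop (t+1)) : Int)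
        = g + (Gspec m (sample[t] :: sample.drop (t + 1)) : Int)
      simp only [Gspec]
      push_cast
      ring

lemma portA_eq (sample : List Int) (m : Int) :
    count_good_subsets sample m = (Gspec m sample : Int) := by
  unfold count_good_subsets
  have := outerA_eq sample m 0 (by omega) 0
  simpa using this

-- B-side invariant: after folding over enumerate (reverse xs), the state is
-- (dictionary of last reversed-index per value, Fspec xs, Gspec xs)
def stepB (m : Int) (st : PySem.Dict Int Int × Int × Int) (kx : Int × Int) :
    PySem.Dict Int Int × Int × Int :=
  let lastk := st.1
  let f := st.2.1
  let goods := st.2.2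
  let k := kx.1
  let x := kx.2
  let f' := if x > m then 0 else min (f + 1) (k - lastk.getD x (-1))
  (lastk.insert x k, f', goods + f')

lemma Binv (m : Int) (xs : List Int) :
    let st := (PySem.List.enumerate xs.reverse 0).foldl (stepB m) (PySem.Dict.empty, 0, 0)
    st.2.1 = (Fspec m xs : Int) ∧ st.2.2 = (Gspec m xs : Int) ∧
      ∀ v, st.1.getD v (-1) =
        if v ∈ xs then ((xs.length : Int) - 1 - (xs.findIdx (· == v) : Int)) else -1 := by
  induction xs with
  | nil =>
      simp [Fspec, Gspec, PySem.List.enumerate_nil, PySem.Dict.getD_empty]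
  | cons x xs ih =>
      obtain ⟨hf, hg, hd⟩ := ih
      have hrev : (x :: xs).reverse = xs.reverse ++ [x] := by simp
      have henum : PySem.List.enumerate ((x :: xs).reverse) 0
          = PySem.List.enumerate xs.reverse 0 ++ [((xs.length : Int), x)] := by
        rw [hrev, PySem.List.enumerate_append]
        simp [PySem.List.enumerate_cons, PySem.List.enumerate_nil]
      rw [henum, List.foldl_append]
      simp only [List.foldl_cons, List.foldl_nil]
      set st := (PySem.List.enumerate xs.reverse 0).foldl (stepB m) (PySem.Dict.empty, 0, 0) with hst
      have hfind : (x :: xs).findIdx (· == x) = 0 := by simp [List.findIdx_cons]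
      have hlast : st.1.getD x (-1) =
          if x ∈ xs then ((xs.length : Int) - 1 - (xs.findIdx (· == x) : Int)) else -1 := hd x
      have hflen : Fspec m xs ≤ xs.length := Fspec_le_length m xs
      have hf' : (if x > m then 0 else min (st.2.1 + 1) ((xs.length : Int) - st.1.getD x (-1)))
          = (Fspec m (x :: xs) : Int) := by
        simp only [Fspec]
        by_cases hm : x > m
        · simp [hm]
        · rw [if_neg hm, if_neg (by omega)]
          rw [hf, hlast]
          by_cases hmem : x ∈ xs
          · rw [if_pos hmem]
            have hidx : xs.findIdx (· == x) < xs.length := by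
              apply List.findIdx_lt_length_of_exists
              exact ⟨x, hmem, by simp⟩
            push_cast
            omega
          · rw [if_neg hmem]
            have hidx : xs.findIdx (· == x) = xs.length := by
              rw [List.findIdx_eq_length]
              intro y hy
              rw [beq_eq_false_iff_ne]
              rintro rfl
              exact hmem hy
            rw [hidx]
            push_cast
            omega
      refine ⟨?_, ?_, ?_⟩
      · simpa [stepB] using hf'
      · show st.2.2 + _ = (Gspec m (x :: xs) : Int)
        rw [hf', hg]
        simp only [Gspec]
        push_cast
        ring
      · intro v
        show (st.1.insert x (xs.length : Int)).getD v (-1) = _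
        rw [PySem.Dict.getD_insert]
        by_cases hv : v = x
        · subst hv
          rw [if_pos rfl, if_pos (by simp)]
          rw [hfind]
          simp only [List.length_cons]
          push_cast
          omega
        · rw [if_neg hv, hd v]
          have hmem : (v ∈ x :: xs) ↔ v ∈ xs := by simp [List.mem_cons, Ne.symm hv, hv]
          have hxv : (x == v) = false := by
            simp only [beq_eq_false_iff_ne, ne_eq]
            exact fun h => hv h.symm
          have hfind' : (x :: xs).findIdx (· == v) = xs.findIdx (· == v) + 1 := by
            simp [List.findIdx_cons, hxv]
          by_cases hvm : v ∈ xs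
          · rw [if_pos hvm, if_pos (hmem.mpr hvm), hfind']
            simp only [List.length_cons]
            push_cast
            omega
          · rw [if_neg hvm, if_neg (fun h => hvm (hmem.mp h))]

lemma portB_eq (sample : List Int) (m : Int) :
    count_good_subsets_alt sample m = (Gspec m sample : Int) := by
  unfold count_good_subsets_alt
  have h := Binv m sample
  exact h.2.1

-- ===== VERDICT (by name: the statement is the Claim_ definition above) =====
theorem count_good_subsets_spec : Claim_equal_count_good_subsets := by
  intro sample m _
  unfold Spec_count_good_subsets
  rw [portA_eq, portB_eq]
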